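-- pv_equiv track=rewrite | github.com/infinite-memoire/backend | app/services/graph_builder.py | _aggregate_temporal_info
-- ===== SOURCE A (Python) =====
-- from typing import List, Dict, Any, Optional, Tuple, Set
--
-- def _aggregate_temporal_info(node_data_list: List[Dict]) -> Dict[str, Any]:
--     """Aggregate temporal information from multiple nodes"""
--     aggregated = {
--         'explicit_dates': [],
--         'relative_expressions': [],
--         'temporal_entities': []
--     }
--
--     for data in node_data_list:
--         temporal_info = data.get('temporal_info', {})
--         for key in aggregated.keys():
--             if key in temporal_info:
--                 aggregated[key].extend(temporal_info[key])
--
--     # Remove duplicates while preserving order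
--     for key in aggregated.keys():
--         seen = set()
--         unique_items = []
--         for item in aggregated[key]:
--             item_key = item.get('text', str(item)) if isinstance(item, dict) else str(item)
--             if item_key not in seen:
--                 seen.add(item_key)
--                 unique_items.append(item)
--         aggregated[key] = unique_items
--
--     return aggregated
-- ===== SOURCE B (Python) =====
-- def _merge(dest, seen, items):
--     for item in items:
--         key = item.get('text', str(item)) if isinstance(item, dict) else str(item)
--         if key not in seen:
--             seen.add(key)
--             dest.append(item)
--
--
-- def _aggregate_temporal_info(node_data_list):
--     explicit, relative, entities = [], [], []
--     seen_e, seen_r, seen_t = set(), set(), set()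
--     for data in node_data_list:
--         ti = data.get('temporal_info', {})
--         _merge(explicit, seen_e, ti.get('explicit_dates', []))
--         _merge(relative, seen_r, ti.get('relative_expressions', []))
--         _merge(entities, seen_t, ti.get('temporal_entities', []))
--     return {
--         'explicit_dates': explicit,
--         'relative_expressions': relative,
--         'temporal_entities': entities,
--     }
-- ===== Notes on version B (the rewrite author's own statement) =====
-- stated objective: alternative
-- what changed: Replaces A's two-phase build-then-dedup (concatenate all nodes' lists into one dict, then a second pass per key removing duplicates) by a single fused pass that keeps three independent (list, seen-set) accumulators and appends each item at most once as it is encountered, never building the intermediate concatenated lists.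
import Mathlib
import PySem

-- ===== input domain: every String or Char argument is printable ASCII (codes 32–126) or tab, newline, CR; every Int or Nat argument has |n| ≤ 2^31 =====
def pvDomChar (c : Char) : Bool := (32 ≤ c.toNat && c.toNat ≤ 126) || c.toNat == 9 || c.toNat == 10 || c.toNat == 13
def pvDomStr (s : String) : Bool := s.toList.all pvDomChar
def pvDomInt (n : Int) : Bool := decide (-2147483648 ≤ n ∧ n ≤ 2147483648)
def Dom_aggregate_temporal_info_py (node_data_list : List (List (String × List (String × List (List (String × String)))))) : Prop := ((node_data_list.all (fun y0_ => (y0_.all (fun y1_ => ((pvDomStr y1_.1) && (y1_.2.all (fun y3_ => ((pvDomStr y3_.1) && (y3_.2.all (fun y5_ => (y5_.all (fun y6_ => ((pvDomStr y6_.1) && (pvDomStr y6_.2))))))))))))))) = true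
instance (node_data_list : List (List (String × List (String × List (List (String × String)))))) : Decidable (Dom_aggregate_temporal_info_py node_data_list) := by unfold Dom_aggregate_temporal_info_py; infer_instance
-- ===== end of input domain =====

-- B is a single fused pass (three independent list/seen-set accumulators, items appended at most
-- once as encountered) instead of A's build-then-dedup two-phase construction; objective: alternative.

-- ===== PORT A =====
-- Python's repr of a str (exact on the Dom alphabet: printable ASCII plus tab/newline/CR):
-- single quotes by default, double quotes iff the string contains ' but no ".
def pyReprQuote (cs : List Char) : Char :=
  if cs.contains '\'' && !(cs.contains '"') then '"' else '\''

def pyReprEsc (q : Char) (c : Char) : List Char :=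
  if c = '\\' then ['\\', '\\']
  else if c = q then ['\\', q]
  else if c = '\n' then ['\\', 'n']
  else if c = '\r' then ['\\', 'r']
  else if c = '\t' then ['\\', 't']
  else [c]

def pyReprStr (s : String) : String :=
  let cs := s.toList
  let q := pyReprQuote cs
  String.ofList ([q] ++ cs.flatMap (pyReprEsc q) ++ [q])

-- Python's str() of a dict with string keys and values ("{'k': 'v', …}" in insertion order)
def pyReprStrDict (d : List (String × String)) : String :=
  "{" ++ String.intercalate ", " (d.map (fun p => pyReprStr p.1 ++ ": " ++ pyReprStr p.2)) ++ "}"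

-- item.get('text', str(item))  (items are dicts by the type, so `isinstance(item, dict)` is always true)
def pyItemKey (item : List (String × String)) : String :=
  match (PySem.Dict.mk item).get? "text" with
  | some t => t
  | none => pyReprStrDict item

def aggregate_temporal_info_py (node_data_list : List (List (String × List (String × List (List (String × String)))))) : List (String × List (List (String × String))) :=
  -- aggregated = {'explicit_dates': [], 'relative_expressions': [], 'temporal_entities': []}
  let aggregated : PySem.Dict String (List (List (String × String))) :=
    PySem.Dict.mk [("explicit_dates", []), ("relative_expressions", []), ("temporal_entities", [])]
  -- phase 1: for data in node_data_list: for key in aggregated.keys(): extend if present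
  let aggregated := node_data_list.foldl (fun agg data =>
    let temporal_info := (PySem.Dict.mk data).getD "temporal_info" []
    agg.keys.foldl (fun agg key =>
      if (PySem.Dict.mk temporal_info).contains key then
        -- temporal_info[key] is guarded by the containment test, so getD is exact here
        agg.modify key [] (fun cur => cur ++ (PySem.Dict.mk temporal_info).getD key [])
      else agg) agg) aggregated
  -- phase 2: per key, rebuild the list keeping first occurrences only
  let aggregated := aggregated.keys.foldl (fun agg key =>
    agg.modify key [] (fun items =>
      (items.foldl (fun (st : PySem.Set String × List (List (String × String))) item =>
        let item_key := pyItemKey item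
        if st.1.contains item_key then st
        else (PySem.Set.add st.1 item_key, st.2 ++ [item])) (PySem.Set.empty, [])).2)) aggregated
  aggregated.items

-- ===== PORT B =====
-- _merge(dest, seen, items): append items whose key is unseen, recording the key
def pyMerge (st : PySem.Set String × List (List (String × String)))
    (items : List (List (String × String))) : PySem.Set String × List (List (String × String)) :=
  items.foldl (fun st item =>
    let key := pyItemKey item
    if st.1.contains key then st
    else (PySem.Set.add st.1 key, st.2 ++ [item])) st

def aggregate_temporal_info_py_alt (node_data_list : List (List (String × List (String × List (List (String × String)))))) : List (String × List (List (String × String))) :=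
  let fin := node_data_list.foldl
    (fun (st : (PySem.Set String × List (List (String × String))) ×
               (PySem.Set String × List (List (String × String))) ×
               (PySem.Set String × List (List (String × String)))) data =>
      let ti := PySem.Dict.mk ((PySem.Dict.mk data).getD "temporal_info" [])
      (pyMerge st.1 (ti.getD "explicit_dates" []),
       pyMerge st.2.1 (ti.getD "relative_expressions" []),
       pyMerge st.2.2 (ti.getD "temporal_entities" [])))
    ((PySem.Set.empty, []), (PySem.Set.empty, []), (PySem.Set.empty, []))
  [("explicit_dates", fin.1.2), ("relative_expressions", fin.2.1.2), ("temporal_entities", fin.2.2.2)]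

-- ===== PRECONDITION & SPEC =====
def Spec_aggregate_temporal_info_py (node_data_list : List (List (String × List (String × List (List (String × String)))))) (out : List (String × List (List (String × String)))) : Prop := out = aggregate_temporal_info_py_alt node_data_list
instance (node_data_list : List (List (String × List (String × List (List (String × String)))))) (out : List (String × List (List (String × String)))) : Decidable (Spec_aggregate_temporal_info_py node_data_list out) := by unfold Spec_aggregate_temporal_info_py; infer_instance

-- ===== CLAIM (what is proved, stated in full; the proofs are below) =====
def Claim_equal_aggregate_temporal_info_py : Prop := ∀ (node_data_list : List (List (String × List (String × List (List (String × String)))))), Dom_aggregate_temporal_info_py node_data_list → Spec_aggregate_temporal_info_py node_data_list (aggregate_temporal_info_py node_data_list)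


-- ===== LEMMAS AND PROOFS =====

-- the items node `data` contributes under `key`
def pvGetK (key : String) (data : List (String × List (String × List (List (String × String))))) :
    List (List (String × String)) :=
  (PySem.Dict.mk ((PySem.Dict.mk data).getD "temporal_info" [])).getD key []

-- find? misses a key none of whose pairs occur in the association list
theorem pv_getD_none {V : Type} (l : List (String × V)) (k : String) (dflt : V)
    (h : ∀ x : V, (k, x) ∉ l) :
    (Option.map (fun x => x.2) (l.find? (fun p => p.1 == k))).getD dflt = dflt := by
  have hn : l.find? (fun p => p.1 == k) = none := by
    rw [List.find?_eq_none]
    rintro ⟨a, b⟩ hp hb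
    simp only [beq_iff_eq] at hb
    subst hb
    exact h b hp
  simp [hn]

-- one step of A's first phase on the literal three-key dict
theorem pv_stepA (data : List (String × List (String × List (List (String × String)))))
    (e r t : List (List (String × String))) :
    (let temporal_info := (PySem.Dict.mk data).getD "temporal_info" []
     List.foldl (fun agg key =>
        if (PySem.Dict.mk temporal_info).contains key then
          agg.modify key [] (fun cur => cur ++ (PySem.Dict.mk temporal_info).getD key [])
        else agg)
       (PySem.Dict.mk [("explicit_dates", e), ("relative_expressions", r), ("temporal_entities", t)])
       (PySem.Dict.mk [("explicit_dates", e), ("relative_expressions", r), ("temporal_entities", t)]).keys)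
    = PySem.Dict.mk [("explicit_dates", e ++ pvGetK "explicit_dates" data),
        ("relative_expressions", r ++ pvGetK "relative_expressions" data),
        ("temporal_entities", t ++ pvGetK "temporal_entities" data)] := by
  simp only [PySem.Dict.keys, List.map_cons, List.map_nil, List.foldl_cons, List.foldl_nil]
  split_ifs with h1 h2 h3 <;>
    simp_all [pvGetK, PySem.Dict.modify, PySem.Dict.insert, PySem.Dict.getD, PySem.Dict.get?,
      PySem.Dict.contains, pv_getD_none]

-- phase 1 of A on the literal three-key dict
theorem pv_phase1 (ns : List (List (String × List (String × List (List (String × String))))))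
    (e r t : List (List (String × String))) :
    ns.foldl (fun agg data =>
      let temporal_info := (PySem.Dict.mk data).getD "temporal_info" []
      agg.keys.foldl (fun agg key =>
        if (PySem.Dict.mk temporal_info).contains key then
          agg.modify key [] (fun cur => cur ++ (PySem.Dict.mk temporal_info).getD key [])
        else agg) agg)
      (PySem.Dict.mk [("explicit_dates", e), ("relative_expressions", r), ("temporal_entities", t)])
    = PySem.Dict.mk [("explicit_dates", e ++ ns.flatMap (pvGetK "explicit_dates")),
        ("relative_expressions", r ++ ns.flatMap (pvGetK "relative_expressions")),
        ("temporal_entities", t ++ ns.flatMap (pvGetK "temporal_entities"))] := by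
  induction ns generalizing e r t with
  | nil => simp
  | cons d ns ih =>
      simp only [List.foldl_cons]
      rw [pv_stepA, ih]
      simp

-- phase 2 of A on the literal three-key dict
theorem pv_phase2 (e r t : List (List (String × String))) :
    (PySem.Dict.mk [("explicit_dates", e), ("relative_expressions", r), ("temporal_entities", t)]).keys.foldl
      (fun agg key =>
        agg.modify key [] (fun items =>
          (items.foldl (fun (st : PySem.Set String × List (List (String × String))) item =>
            let item_key := pyItemKey item
            if st.1.contains item_key then st
            else (PySem.Set.add st.1 item_key, st.2 ++ [item])) (PySem.Set.empty, [])).2))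
      (PySem.Dict.mk [("explicit_dates", e), ("relative_expressions", r), ("temporal_entities", t)])
    = PySem.Dict.mk [("explicit_dates", (pyMerge (PySem.Set.empty, []) e).2),
        ("relative_expressions", (pyMerge (PySem.Set.empty, []) r).2),
        ("temporal_entities", (pyMerge (PySem.Set.empty, []) t).2)] := by
  simp only [PySem.Dict.keys, List.map_cons, List.map_nil, List.foldl_cons, List.foldl_nil]
  simp [pyMerge, PySem.Dict.modify, PySem.Dict.insert, PySem.Dict.getD, PySem.Dict.get?,
    PySem.Dict.contains]

-- B's fused loop splits into three independent pyMerge folds over the concatenated streams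
theorem pv_bfold (ns : List (List (String × List (String × List (List (String × String))))))
    (s1 s2 s3 : PySem.Set String × List (List (String × String))) :
    ns.foldl (fun st data =>
      let ti := PySem.Dict.mk ((PySem.Dict.mk data).getD "temporal_info" [])
      (pyMerge st.1 (ti.getD "explicit_dates" []),
       pyMerge st.2.1 (ti.getD "relative_expressions" []),
       pyMerge st.2.2 (ti.getD "temporal_entities" []))) (s1, s2, s3)
    = (pyMerge s1 (ns.flatMap (pvGetK "explicit_dates")),
       pyMerge s2 (ns.flatMap (pvGetK "relative_expressions")),
       pyMerge s3 (ns.flatMap (pvGetK "temporal_entities"))) := by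
  induction ns generalizing s1 s2 s3 with
  | nil => simp [pyMerge]
  | cons d ns ih =>
      simp only [List.foldl_cons, List.flatMap_cons, ih]
      simp [pyMerge, pvGetK, List.foldl_append]

-- ===== VERDICT (by name: the statement is the Claim_ definition above) =====
theorem aggregate_temporal_info_py_spec : Claim_equal_aggregate_temporal_info_py := by
  intro ns _
  unfold Spec_aggregate_temporal_info_py
  simp only [aggregate_temporal_info_py, aggregate_temporal_info_py_alt]
  rw [pv_phase1, pv_phase2, pv_bfold]
  simp
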